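-- pv_equiv track=rewrite | github.com/lethanhdat04/Entrance_Test | task2/SumOfTopTwoIntegers.py | sum_of_top_two
-- ===== SOURCE A (Python) =====
-- def sum_of_top_two(numbers):
--     first_max = second_max = float('-inf')
--
--     for num in numbers:
--         if num > first_max:
--             second_max = first_max
--             first_max = num
--         elif num > second_max:
--             second_max = num
--
--     return first_max + second_max
-- ===== SOURCE B (Python) =====
-- def sum_of_top_two(numbers):
--     s = sorted(numbers)
--     return s[-1] + s[-2]
-- ===== Notes on version B (the rewrite author's own statement) =====
-- stated objective: simpler
-- what changed: Replaces the streaming top-two tracking (two running maxima updated per element) with a sort-then-index strategy: sort a copy and add the last two elements.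
-- outside the precondition, e.g. on sum_of_top_two([]): A returns -inf, B raises IndexError; on sum_of_top_two([5]): A returns -inf, B raises IndexError
import Mathlib
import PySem

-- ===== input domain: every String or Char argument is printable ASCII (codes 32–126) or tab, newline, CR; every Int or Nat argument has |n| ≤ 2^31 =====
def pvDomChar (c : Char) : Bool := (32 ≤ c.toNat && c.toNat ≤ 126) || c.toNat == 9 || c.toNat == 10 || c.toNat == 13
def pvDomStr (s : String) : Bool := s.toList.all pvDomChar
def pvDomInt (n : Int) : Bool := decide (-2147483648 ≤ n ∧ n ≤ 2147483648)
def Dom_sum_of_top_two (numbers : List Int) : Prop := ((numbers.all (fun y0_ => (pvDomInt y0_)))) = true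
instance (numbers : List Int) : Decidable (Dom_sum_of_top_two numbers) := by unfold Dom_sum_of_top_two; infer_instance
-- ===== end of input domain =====

-- B replaces A's streaming top-two tracking with sort-then-index (sum of the last two of a sorted copy); objective: simpler.


-- ===== PORT A =====
-- float('-inf') is modelled by `none` (less than every Int); exact while both maxima are ints,
-- i.e. whenever the list has ≥ 2 elements (Pre_); the `| _ => 0` arm is only reachable outside Pre_.
def pvGtO (num : Int) (o : Option Int) : Bool :=
  match o with
  | none => true
  | some v => decide (v < num)

def pvStep (s : Option Int × Option Int) (num : Int) : Option Int × Option Int :=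
  if pvGtO num s.1 then (some num, s.1)
  else if pvGtO num s.2 then (s.1, some num)
  else s

def sum_of_top_two (numbers : List Int) : Int :=
  match numbers.foldl pvStep (none, none) with
  | (some a, some b) => a + b
  | _ => 0

-- ===== PORT B =====
def sum_of_top_two_alt (numbers : List Int) : Int :=
  let s := PySem.List.sorted numbers (fun x => x) false
  PySem.List.pyGetD s (-1) 0 + PySem.List.pyGetD s (-2) 0

-- ===== PRECONDITION & SPEC =====
-- Pre_ excludes lists with fewer than two elements: there A returns float('-inf'), which is not an
-- Int value, and B raises IndexError.
def Pre_sum_of_top_two (numbers : List Int) : Prop := 2 ≤ numbers.length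
instance (numbers : List Int) : Decidable (Pre_sum_of_top_two numbers) := by
  unfold Pre_sum_of_top_two; infer_instance

def pvWitness_sum_of_top_two : List Int := [3, 1, 4]

def Spec_sum_of_top_two (numbers : List Int) (out : Int) : Prop := out = sum_of_top_two_alt numbers
instance (numbers : List Int) (out : Int) : Decidable (Spec_sum_of_top_two numbers out) := by
  unfold Spec_sum_of_top_two; infer_instance

-- ===== CLAIM (what is proved, stated in full; the proofs are below) =====
def Claim_equal_sum_of_top_two : Prop := ∀ (numbers : List Int), Dom_sum_of_top_two numbers → Pre_sum_of_top_two numbers → Spec_sum_of_top_two numbers (sum_of_top_two numbers)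

-- ===== LEMMAS AND PROOFS =====

-- the fold step is right-commutative, so A's fold is invariant under permutation
theorem pvStep_rightComm : ∀ (s : Option Int × Option Int) (a b : Int),
    pvStep (pvStep s a) b = pvStep (pvStep s b) a := by
  rintro ⟨f, sd⟩ a b
  cases f <;> cases sd <;>
    simp only [pvStep, pvGtO] <;> split_ifs <;> simp_all <;> omega

-- on a non-decreasing list p ++ [x], A's fold returns (last, second-to-last)
theorem pvFold_sorted : ∀ (p : List Int) (x : Int),
    (p ++ [x]).Pairwise (· ≤ ·) →
    (p ++ [x]).foldl pvStep (none, none) = (some x, p.getLast?) := by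
  intro p
  induction p using List.reverseRecOn with
  | nil =>
    intro x _
    simp [pvStep, pvGtO]
  | append_singleton q y ih =>
    intro x hpw
    have hyx : y ≤ x := by
      have := List.pairwise_append.1 hpw
      exact this.2.2 y (by simp) x (by simp)
    have hq : (q ++ [y]).Pairwise (· ≤ ·) := by
      have : (q ++ [y]).Sublist ((q ++ [y]) ++ [x]) := by simp
      exact hpw.sublist this
    have hz : ∀ z ∈ q.getLast?, z ≤ y := by
      intro z hzm
      have hzq : z ∈ q := List.mem_of_getLast? (by exact hzm)
      exact (List.pairwise_append.1 hq).2.2 z hzq y (by simp)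
    have hfq : List.foldl pvStep (none, none) (q ++ [y]) = (some y, q.getLast?) := ih y hq
    rw [List.foldl_append, hfq]
    rcases lt_or_eq_of_le hyx with hlt | heq
    · simp [pvStep, pvGtO, hlt, List.getLast?_append]
    · subst heq
      cases hql : q.getLast? with
      | none => simp [pvStep, pvGtO, List.getLast?_append]
      | some z =>
        have hzy : z ≤ y := hz z (by simp [hql])
        rcases lt_or_eq_of_le hzy with hlt | heq
        · simp [pvStep, pvGtO, hlt, hql, List.getLast?_append]
        · subst heq
          simp [pvStep, pvGtO, hql, List.getLast?_append]

theorem sum_of_top_two_spec : Claim_equal_sum_of_top_two := by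
  intro numbers _ hpre
  unfold Spec_sum_of_top_two sum_of_top_two sum_of_top_two_alt Pre_sum_of_top_two at *
  set s := PySem.List.sorted numbers (fun x => x) false with hs
  have hperm : s.Perm numbers := PySem.List.sorted_perm numbers (fun x => x) false
  have hlen : 2 ≤ s.length := by rw [hperm.length_eq]; exact hpre
  have hpw : s.Pairwise (· ≤ ·) := by
    have := PySem.List.sorted_pairwise numbers (fun x => x)
    simpa using this
  -- fold over numbers = fold over the sorted list
  have hfold : numbers.foldl pvStep (none, none) = s.foldl pvStep (none, none) :=
    (@List.Perm.foldl_eq _ _ pvStep numbers s ⟨pvStep_rightComm⟩ hperm.symm (none, none))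
  -- s = s.dropLast ++ [last]
  have hne : s ≠ [] := by intro h; rw [h] at hlen; simp at hlen
  have hsplit : s.dropLast ++ [s.getLast hne] = s := List.dropLast_append_getLast hne
  have hpw' : (s.dropLast ++ [s.getLast hne]).Pairwise (· ≤ ·) := by rw [hsplit]; exact hpw
  have hfold2 : s.foldl pvStep (none, none) = (some (s.getLast hne), s.dropLast.getLast?) := by
    have h := pvFold_sorted s.dropLast (s.getLast hne) hpw'
    rwa [hsplit] at h
  have hdlen : s.dropLast.length = s.length - 1 := by simp
  have hdne : s.dropLast ≠ [] := by
    intro h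
    rw [h] at hdlen
    simp at hdlen
    omega
  have h1 : PySem.List.pyGetD s (-1) 0 = s.getLast hne := PySem.List.pyGetD_neg_one s 0 hne
  have h2 : PySem.List.pyGetD s (-2) 0 = s.dropLast.getLast hdne := by
    rw [PySem.List.pyGetD_neg_ofNat s 2 0 (by omega) (by omega)]
    rw [List.getLast_eq_getElem, List.getElem_dropLast]
    congr 1
    omega
  rw [hfold, hfold2, List.getLast?_eq_some_getLast hdne]
  show s.getLast hne + s.dropLast.getLast hdne
      = PySem.List.pyGetD s (-1) 0 + PySem.List.pyGetD s (-2) 0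
  rw [h1, h2]
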